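-- pv_equiv track=rewrite | github.com/kakaonlp-internship2018/wsd | pytorch/practice.py | make_index_dic
-- ===== SOURCE A (Python) =====
-- def make_index_dic(input_list):
--     """
--     Arg:
--         input_list: some list
--     Return:
--         dictionary, key = elements of input list, value = index of each element.
--         {'01': 0, '03': 1, '13': 2, ...}
--     """
--     result = {}
--     index = 0
--     for elt in input_list:
--         if result.get(elt, -1) == -1:
--             result[elt] = index
--             index = index + 1
--     return result
-- ===== SOURCE B (Python) =====
-- def make_index_dic(input_list):
--     first = {}
--     for pos, elt in enumerate(input_list):
--         if elt not in first:
--             first[elt] = pos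
--     order = sorted(first, key=lambda k: first[k])
--     return {elt: rank for rank, elt in enumerate(order)}
-- ===== Notes on version B (the rewrite author's own statement) =====
-- stated objective: alternative
-- what changed: Replaces the single guarded pass with a running index counter by a rank-by-sorting algorithm: record each element's first-occurrence position, sort the unique elements by that position, and assign ranks from the sorted order.
import Mathlib
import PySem

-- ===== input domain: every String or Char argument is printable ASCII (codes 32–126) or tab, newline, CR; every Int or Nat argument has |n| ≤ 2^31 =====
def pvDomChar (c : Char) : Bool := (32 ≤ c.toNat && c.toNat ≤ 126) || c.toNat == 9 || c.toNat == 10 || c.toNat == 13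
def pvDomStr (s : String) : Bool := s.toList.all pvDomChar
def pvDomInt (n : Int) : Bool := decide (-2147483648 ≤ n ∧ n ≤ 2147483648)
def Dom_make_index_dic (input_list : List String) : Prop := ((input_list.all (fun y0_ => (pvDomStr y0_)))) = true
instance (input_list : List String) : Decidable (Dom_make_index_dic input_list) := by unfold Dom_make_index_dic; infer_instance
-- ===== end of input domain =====

-- B replaces A's guarded single pass with a running counter by a rank-by-sorting algorithm
-- (first-occurrence positions, sort unique elements by position, rank); return value only.

-- ===== PORT A =====
def make_index_dic (input_list : List String) : List (String × Int) :=
  (input_list.foldl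
    (fun (st : PySem.Dict String Int × Int) elt =>
      if st.1.getD elt (-1) == (-1 : Int) then (st.1.insert elt st.2, st.2 + 1) else st)
    (PySem.Dict.empty, 0)).1.items

-- ===== PORT B =====
-- first pass: elt ↦ its first-occurrence position
def pvFirst (input_list : List String) : PySem.Dict String Int :=
  (PySem.List.enumerate input_list 0).foldl
    (fun first p => if !(first.contains p.2) then first.insert p.2 p.1 else first)
    PySem.Dict.empty

-- order = sorted(first, key=lambda k: first[k]); first[k] is exact as getD with any default
-- since every k iterated is a key of first. The final dict comprehension over enumerate(order)
-- is Dict.ofList of the swapped enumerate pairs.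
def make_index_dic_alt (input_list : List String) : List (String × Int) :=
  (PySem.Dict.ofList
    ((PySem.List.enumerate
        (PySem.List.sorted (pvFirst input_list).keys (fun k => (pvFirst input_list).getD k 0)) 0).map
      (fun p => (p.2, p.1)))).items

-- ===== PRECONDITION & SPEC =====
def Spec_make_index_dic (input_list : List String) (out : List (String × Int)) : Prop := out = make_index_dic_alt input_list
instance (input_list : List String) (out : List (String × Int)) : Decidable (Spec_make_index_dic input_list out) := by unfold Spec_make_index_dic; infer_instance

-- ===== CLAIM (what is proved, stated in full; the proofs are below) =====
def Claim_equal_make_index_dic : Prop := ∀ (input_list : List String), Dom_make_index_dic input_list → Spec_make_index_dic input_list (make_index_dic input_list)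

-- ===== LEMMAS AND PROOFS =====

-- A's result on suffix t when the distinct elements seen so far are s (as association list)
def pvSpecA (t : List String) (s : List String) : List (String × Int) :=
  match t with
  | [] => []
  | h :: t => if h ∈ s then pvSpecA t s else (h, (s.length : Int)) :: pvSpecA t (s ++ [h])

-- B's first-occurrence items on suffix t, seen set s, next position i
def pvSpecF (t : List String) (s : List String) (i : Int) : List (String × Int) :=
  match t with
  | [] => []
  | h :: t => if h ∈ s then pvSpecF t s (i + 1) else (h, i) :: pvSpecF t (s ++ [h]) (i + 1)

theorem pvA_loop (t : List String) (d : PySem.Dict String Int)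
    (hnd : d.keys.Nodup) (hval : ∀ p ∈ d.items, 0 ≤ p.2) :
    (t.foldl
      (fun (st : PySem.Dict String Int × Int) elt =>
        if st.1.getD elt (-1) == (-1 : Int) then (st.1.insert elt st.2, st.2 + 1) else st)
      (d, (d.size : Int))).1.items = d.items ++ pvSpecA t d.keys := by
  induction t generalizing d with
  | nil => simp [pvSpecA]
  | cons h t ih =>
    simp only [List.foldl_cons]
    by_cases hmem : h ∈ d.keys
    · -- h already a key: its stored value is ≥ 0, so getD ≠ -1 and the state is unchanged
      have hmem' : h ∈ d.items.map Prod.fst := by simpa [PySem.Dict.keys] using hmem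
      obtain ⟨p, hp, hfst⟩ := List.mem_map.mp hmem'
      have hget : d.get? h = some p.2 := by
        have := PySem.Dict.get?_of_mem_items d (k := p.1) (v := p.2) hp hnd
        rwa [hfst] at this
      have hgd : d.getD h (-1) = p.2 := by
        rw [PySem.Dict.getD_eq_get?_getD, hget]; rfl
      have hc : ¬ (d.getD h (-1) == (-1 : Int)) = true := by
        simp only [beq_iff_eq, hgd]
        have := hval p hp
        omega
      rw [if_neg hc]
      simp only [pvSpecA, if_pos hmem]
      exact ih d hnd hval
    · -- h fresh: getD = -1, insert it with value d.size
      have hcon : d.contains h = false := by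
        rw [PySem.Dict.contains_eq_decide_mem_keys]
        simp [hmem]
      have hgd : d.getD h (-1) = -1 := PySem.Dict.getD_of_not_contains d (-1) hcon
      rw [if_pos (by simp [hgd])]
      have hitems : (d.insert h (d.size : Int)).items = d.items ++ [(h, (d.size : Int))] :=
        PySem.Dict.items_insert_of_not_contains d _ hcon
      have hkeys : (d.insert h (d.size : Int)).keys = d.keys ++ [h] :=
        PySem.Dict.keys_insert_of_not_contains d _ hcon
      have hnd' : (d.insert h (d.size : Int)).keys.Nodup := by
        rw [hkeys]
        exact List.Nodup.append hnd (List.nodup_singleton h)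
          (List.disjoint_singleton.mpr hmem)
      have hval' : ∀ p ∈ (d.insert h (d.size : Int)).items, 0 ≤ p.2 := by
        intro p hp
        rw [hitems] at hp
        rcases List.mem_append.mp hp with h1 | h2
        · exact hval p h1
        · simp at h2; subst h2; positivity
      have hsz : ((d.insert h (d.size : Int)).size : Int) = (d.size : Int) + 1 := by
        simp only [PySem.Dict.size]
        rw [show (d.insert h ((d.items.length : Nat) : Int)).items
              = d.items ++ [(h, ((d.items.length : Nat) : Int))] from hitems]
        simp
      have := ih (d.insert h (d.size : Int)) hnd' hval'
      rw [hsz] at this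
      rw [this, hitems, hkeys]
      have hlen : (d.size : Int) = ((d.keys.length : Nat) : Int) := by
        simp [PySem.Dict.size, PySem.Dict.keys]
      simp only [pvSpecA, if_neg hmem, hlen]
      simp

theorem pvF_loop (t : List String) (e : PySem.Dict String Int) (i : Int)
    (hnd : e.keys.Nodup) :
    ((PySem.List.enumerate t i).foldl
      (fun first p => if !(first.contains p.2) then first.insert p.2 p.1 else first)
      e).items = e.items ++ pvSpecF t e.keys i := by
  induction t generalizing e i with
  | nil => simp [PySem.List.enumerate_nil, pvSpecF]
  | cons h t ih =>
    rw [PySem.List.enumerate_cons, List.foldl_cons]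
    by_cases hmem : h ∈ e.keys
    · have hcon : e.contains h = true := by
        rw [PySem.Dict.contains_eq_decide_mem_keys]; simp [hmem]
      simp only [hcon, Bool.not_true, Bool.false_eq_true, if_false]
      simp only [pvSpecF, if_pos hmem]
      exact ih e (i + 1) hnd
    · have hcon : e.contains h = false := by
        rw [PySem.Dict.contains_eq_decide_mem_keys]; simp [hmem]
      simp only [hcon, Bool.not_false, if_true]
      have hitems : (e.insert h i).items = e.items ++ [(h, i)] :=
        PySem.Dict.items_insert_of_not_contains e _ hcon
      have hkeys : (e.insert h i).keys = e.keys ++ [h] :=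
        PySem.Dict.keys_insert_of_not_contains e _ hcon
      have hnd' : (e.insert h i).keys.Nodup := by
        rw [hkeys]
        exact List.Nodup.append hnd (List.nodup_singleton h)
          (List.disjoint_singleton.mpr hmem)
      have := ih (e.insert h i) (i + 1) hnd'
      rw [this, hitems, hkeys]
      simp [pvSpecF, if_neg hmem]

-- keys produced by pvSpecF avoid s and are distinct
theorem pvSpecF_keys (t : List String) (s : List String) (i : Int) :
    (∀ k ∈ (pvSpecF t s i).map Prod.fst, k ∉ s) ∧ ((pvSpecF t s i).map Prod.fst).Nodup := by
  induction t generalizing s i with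
  | nil => simp [pvSpecF]
  | cons h t ih =>
    by_cases hmem : h ∈ s
    · simpa [pvSpecF, if_pos hmem] using ih s (i + 1)
    · obtain ⟨ihd, ihn⟩ := ih (s ++ [h]) (i + 1)
      constructor
      · intro k hk
        simp only [pvSpecF, if_neg hmem, List.map_cons, List.mem_cons] at hk
        rcases hk with rfl | hk
        · exact hmem
        · intro hks
          exact ihd k hk (List.mem_append_left _ hks)
      · simp only [pvSpecF, if_neg hmem, List.map_cons, List.nodup_cons]
        refine ⟨fun hh => ?_, ihn⟩
        exact ihd h hh (List.mem_append_right _ (List.mem_singleton_self h))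

-- values produced by pvSpecF are ≥ i
theorem pvSpecF_snd_ge (t : List String) (s : List String) (i : Int) :
    ∀ p ∈ pvSpecF t s i, i ≤ p.2 := by
  induction t generalizing s i with
  | nil => simp [pvSpecF]
  | cons h t ih =>
    intro p hp
    by_cases hmem : h ∈ s
    · rw [pvSpecF, if_pos hmem] at hp
      have := ih s (i + 1) p hp
      omega
    · rw [pvSpecF, if_neg hmem] at hp
      rcases List.mem_cons.mp hp with rfl | hp
      · exact le_refl i
      · have := ih (s ++ [h]) (i + 1) p hp
        omega

-- values produced by pvSpecF are strictly increasing
theorem pvSpecF_snd_pairwise (t : List String) (s : List String) (i : Int) :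
    (pvSpecF t s i).Pairwise (fun p q => p.2 < q.2) := by
  induction t generalizing s i with
  | nil => simp [pvSpecF]
  | cons h t ih =>
    by_cases hmem : h ∈ s
    · simpa [pvSpecF, if_pos hmem] using ih s (i + 1)
    · simp only [pvSpecF, if_neg hmem]
      refine List.Pairwise.cons (fun q hq => ?_) (ih (s ++ [h]) (i + 1))
      have := pvSpecF_snd_ge t (s ++ [h]) (i + 1) q hq
      simp only
      omega

-- ranking the first-occurrence keys in order recovers A's consecutive indices
theorem pvEnum (t : List String) (s : List String) (i : Int) :
    (PySem.List.enumerate ((pvSpecF t s i).map Prod.fst) ((s.length : Nat) : Int)).map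
      (fun p => (p.2, p.1)) = pvSpecA t s := by
  induction t generalizing s i with
  | nil => simp [pvSpecF, pvSpecA, PySem.List.enumerate_nil]
  | cons h t ih =>
    by_cases hmem : h ∈ s
    · simp only [pvSpecF, pvSpecA, if_pos hmem]
      exact ih s (i + 1)
    · simp only [pvSpecF, pvSpecA, if_neg hmem, List.map_cons, PySem.List.enumerate_cons]
      rw [List.cons_eq_cons]
      refine ⟨rfl, ?_⟩
      · have := ih (s ++ [h]) (i + 1)
        rw [show (((s ++ [h]).length : Nat) : Int) = ((s.length : Nat) : Int) + 1 by simp] at this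
        exact this

theorem make_index_dic_spec : Claim_equal_make_index_dic := by
  intro l _
  unfold Spec_make_index_dic make_index_dic make_index_dic_alt pvFirst
  have hemp : PySem.Dict.empty.items = ([] : List (String × Int)) := rfl
  have hempk : (PySem.Dict.empty : PySem.Dict String Int).keys = ([] : List String) := rfl
  -- A's side
  have hA := pvA_loop l PySem.Dict.empty (by rw [hempk]; exact List.nodup_nil)
    (by rw [hemp]; intro p hp; cases hp)
  simp only [PySem.Dict.size_empty, Nat.cast_zero, hemp, hempk, List.nil_append] at hA
  rw [hA]
  -- B's first pass
  have hF := pvF_loop l PySem.Dict.empty 0 (by rw [hempk]; exact List.nodup_nil)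
  simp only [hemp, hempk, List.nil_append] at hF
  set first := (PySem.List.enumerate l 0).foldl
      (fun first p => if !(first.contains p.2) then first.insert p.2 p.1 else first)
      PySem.Dict.empty with hfirst
  set ps := pvSpecF l ([] : List String) 0 with hps
  have hkeys : first.keys = ps.map Prod.fst := by
    simp [PySem.Dict.keys, hF]
  have hkeysnd : (ps.map Prod.fst).Nodup := (pvSpecF_keys l [] 0).2
  have hndk : first.keys.Nodup := by rw [hkeys]; exact hkeysnd
  -- the keys are already in increasing first-position order, so the sort is the identity
  have hgetD : ∀ p ∈ ps, first.getD p.1 0 = p.2 := by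
    intro p hp
    exact PySem.Dict.getD_of_mem_items (d := first) (by rw [hF]; exact hp) hndk 0
  have hpair : first.keys.Pairwise (fun a b => first.getD a 0 < first.getD b 0) := by
    rw [hkeys, List.pairwise_map]
    refine List.Pairwise.imp_of_mem ?_ (pvSpecF_snd_pairwise l [] 0)
    intro p q hp hq hlt
    rw [hgetD p hp, hgetD q hq]
    exact hlt
  have hsorted : PySem.List.sorted first.keys (fun k => first.getD k 0) = first.keys :=
    PySem.List.sorted_eq_of_perm_of_pairwise_lt first.keys first.keys _ (List.Perm.refl _) hpair
  rw [hsorted, hkeys]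
  -- collapse ofList over distinct fresh keys
  have hmapfst : (((PySem.List.enumerate (ps.map Prod.fst) 0).map
      (fun p => (p.2, p.1))).map Prod.fst) = ps.map Prod.fst := by
    rw [List.map_map]
    exact PySem.List.map_snd_enumerate _ _
  have hofList : (PySem.Dict.ofList ((PySem.List.enumerate (ps.map Prod.fst) 0).map
      (fun p => (p.2, p.1)))).items
      = (PySem.List.enumerate (ps.map Prod.fst) 0).map (fun p => (p.2, p.1)) := by
    unfold PySem.Dict.ofList PySem.Dict.update
    have := PySem.Dict.items_foldl_insert_fresh
      (l := (PySem.List.enumerate (ps.map Prod.fst) 0).map (fun p => (p.2, p.1)))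
      (k := Prod.fst) (v := Prod.snd) (d := PySem.Dict.empty)
      (by intro a _; exact PySem.Dict.contains_empty _)
      (by rw [hmapfst]; exact hkeysnd)
    simpa using this
  rw [hofList]
  have := pvEnum l [] 0
  simp only [List.length_nil, Nat.cast_zero] at this
  exact this.symm
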